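-- pv_equiv track=rewrite | github.com/boblsturm/folkplagiarism | similarity/ngrams.py | index_ngrams
-- ===== SOURCE A (Python) =====
-- from collections import Counter, defaultdict
--
-- def index_ngrams(tunes, ngram_size):
--     total = Counter()
--     ngram_occurrences = defaultdict(list)
--     all_tune_ngrams = []
--     all_tune_ngram_counts = []
--     for tune_id, tune in enumerate(tunes):
--         tune_ngrams = get_ngrams(tune, ngram_size)
--         tune_ngram_counts = Counter(tune_ngrams)
--         total += tune_ngram_counts
--         all_tune_ngrams.append(tune_ngrams)
--         all_tune_ngram_counts.append(tune_ngram_counts)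
--         for pos, ngram in enumerate(tune_ngrams):
--             ngram_occurrences[ngram].append({
--                 'tune_id': tune_id,
--                 'pos': pos
--             })
--     return total, ngram_occurrences, all_tune_ngrams, all_tune_ngram_counts
--
-- def get_ngrams(intervals, ngram_size):
--     """
--     Get list of ngrams (tuples) with length `ngram_size` found in `intervals`.
--     """
--     ngrams = [
--         tuple(intervals[pos : pos + ngram_size])
--         for pos in range(len(intervals) - ngram_size + 1)
--     ]
--     return ngrams
-- ===== SOURCE B (Python) =====
-- from collections import Counter, defaultdict
--
-- def index_ngrams(tunes, ngram_size):
--     # Flat-stream decomposition: emit one global stream of (tune_id, pos, ngram)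
--     # occurrence triples, then derive each of the four outputs by grouping that
--     # stream (by ngram for the index and the grand total, by tune_id for the
--     # per-tune ngram lists and counts). No per-tune pipeline, no Counter merging.
--     triples = [
--         (tune_id, pos, tuple(tune[pos : pos + ngram_size]))
--         for tune_id, tune in enumerate(tunes)
--         for pos in range(len(tune) - ngram_size + 1)
--     ]
--     ngram_occurrences = defaultdict(list)
--     for tune_id, pos, ngram in triples:
--         ngram_occurrences[ngram].append({'tune_id': tune_id, 'pos': pos})
--     all_tune_ngrams = [[] for _ in tunes]
--     for tune_id, _, ngram in triples:
--         all_tune_ngrams[tune_id].append(ngram)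
--     all_tune_ngram_counts = [Counter() for _ in tunes]
--     for tune_id, _, ngram in triples:
--         all_tune_ngram_counts[tune_id][ngram] += 1
--     total = Counter(ngram for _, _, ngram in triples)
--     return total, ngram_occurrences, all_tune_ngrams, all_tune_ngram_counts
-- ===== Notes on version B (the rewrite author's own statement) =====
-- stated objective: alternative
-- what changed: B replaces A's per-tune pipeline (get_ngrams helper, per-tune Counter, running Counter merge 'total +=', nested occurrence loop) by one flat stream of (tune_id, pos, ngram) occurrence triples built by a single double comprehension; all four outputs are then derived by grouping that stream: by ngram for the occurrence index and the grand total, and by tune_id (index-addressed accumulation into preallocated slots) for the per-tune ngram lists and counts.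
import Mathlib
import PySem

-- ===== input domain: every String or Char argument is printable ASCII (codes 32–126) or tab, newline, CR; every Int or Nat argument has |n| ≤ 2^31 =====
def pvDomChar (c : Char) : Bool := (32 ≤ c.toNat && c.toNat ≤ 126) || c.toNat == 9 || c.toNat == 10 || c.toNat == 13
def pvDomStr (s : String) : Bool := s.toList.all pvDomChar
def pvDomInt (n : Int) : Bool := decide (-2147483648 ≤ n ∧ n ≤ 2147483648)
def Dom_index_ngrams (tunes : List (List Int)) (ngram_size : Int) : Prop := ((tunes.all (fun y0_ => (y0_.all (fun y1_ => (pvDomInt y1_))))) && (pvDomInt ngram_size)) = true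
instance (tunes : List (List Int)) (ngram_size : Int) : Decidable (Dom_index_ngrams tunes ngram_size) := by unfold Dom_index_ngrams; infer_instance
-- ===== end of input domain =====

-- B replaces A's per-tune pipeline (get_ngrams, Counter, running Counter merge, nested occurrence loop)
-- by one flat stream of (tune_id, pos, ngram) triples from which all four outputs are derived by grouping;
-- alternative decomposition, same asymptotic cost.


-- ===== PORT A =====
-- get_ngrams: [tuple(intervals[pos:pos+ngram_size]) for pos in range(len(intervals)-ngram_size+1)]
def get_ngrams (intervals : List Int) (ngram_size : Int) : List (List Int) :=
  (PySem.List.pyRange 0 ((intervals.length : Int) - ngram_size + 1)).map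
    (fun pos => PySem.List.slice intervals (some pos) (some (pos + ngram_size)))

-- total += tune_ngram_counts  (Counter.__iadd__: existing keys keep their position, new keys append; all counts positive)
def pvCounterAdd (t : PySem.Dict (List Int) Int) (c : PySem.Dict (List Int) Int) : PySem.Dict (List Int) Int :=
  c.items.foldl (fun t kv => t.insert kv.1 (t.getD kv.1 0 + kv.2)) t

-- inner loop: for pos, ngram in enumerate(tune_ngrams): ngram_occurrences[ngram].append({'tune_id':…,'pos':…})
def pvOccStep (tid : Int) (xs : List (List Int))
    (d : PySem.Dict (List Int) (List (List (String × Int)))) :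
    PySem.Dict (List Int) (List (List (String × Int))) :=
  (PySem.List.enumerate xs 0).foldl
    (fun d q => d.modify q.2 [] (fun v => v ++ [[("tune_id", tid), ("pos", q.1)]])) d

-- one iteration of A's main loop over enumerate(tunes)
def pvStepA (n : Int)
    (st : PySem.Dict (List Int) Int × PySem.Dict (List Int) (List (List (String × Int))) ×
          List (List (List Int)) × List (PySem.Dict (List Int) Int))
    (p : Int × List Int) :
    PySem.Dict (List Int) Int × PySem.Dict (List Int) (List (List (String × Int))) ×
    List (List (List Int)) × List (PySem.Dict (List Int) Int) :=
  let tune_ngrams := get_ngrams p.2 n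
  let tune_ngram_counts := PySem.Dict.counter tune_ngrams
  (pvCounterAdd st.1 tune_ngram_counts,
   pvOccStep p.1 tune_ngrams st.2.1,
   st.2.2.1 ++ [tune_ngrams],
   st.2.2.2 ++ [tune_ngram_counts])

def index_ngrams (tunes : List (List Int)) (ngram_size : Int) : (List (List Int × Int)) × (List (List Int × List (List (String × Int)))) × List (List (List Int)) × (List (List (List Int × Int))) :=
  let st := (PySem.List.enumerate tunes 0).foldl (pvStepA ngram_size)
    (PySem.Dict.empty, PySem.Dict.empty, [], [])
  (st.1.items, st.2.1.items, st.2.2.1, st.2.2.2.map (·.items))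

-- ===== PORT B =====
-- flat stream of (tune_id, pos, ngram) occurrence triples (the double comprehension in Source B)
def pvTriples (tunes : List (List Int)) (n : Int) : List (Int × Int × List Int) :=
  (PySem.List.enumerate tunes 0).flatMap (fun p =>
    (PySem.List.pyRange 0 ((p.2.length : Int) - n + 1)).map
      (fun pos => (p.1, pos, PySem.List.slice p.2 (some pos) (some (pos + n)))))

def index_ngrams_alt (tunes : List (List Int)) (ngram_size : Int) : (List (List Int × Int)) × (List (List Int × List (List (String × Int)))) × List (List (List Int)) × (List (List (List Int × Int))) :=
  let triples := pvTriples tunes ngram_size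
  -- for tune_id, pos, ngram in triples: ngram_occurrences[ngram].append({...})
  let ngram_occurrences := triples.foldl
    (fun d t => d.modify t.2.2 [] (fun v => v ++ [[("tune_id", t.1), ("pos", t.2.1)]]))
    PySem.Dict.empty
  -- all_tune_ngrams = [[] for _ in tunes]; then all_tune_ngrams[tune_id].append(ngram)
  -- (t.1 comes from enumerate, hence 0 ≤ t.1 < len(tunes): .toNat is exact here)
  let all_tune_ngrams := triples.foldl
    (fun ls t => ls.modify t.1.toNat (fun xs => xs ++ [t.2.2]))
    (tunes.map (fun _ => ([] : List (List Int))))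
  -- all_tune_ngram_counts = [Counter() for _ in tunes]; then all_tune_ngram_counts[tune_id][ngram] += 1
  let all_tune_ngram_counts := triples.foldl
    (fun ls t => ls.modify t.1.toNat (fun d => d.modify t.2.2 0 (· + 1)))
    (tunes.map (fun _ => (PySem.Dict.empty : PySem.Dict (List Int) Int)))
  -- total = Counter(ngram for _, _, ngram in triples)
  let total := PySem.Dict.counter (triples.map (fun t => t.2.2))
  (total.items, ngram_occurrences.items, all_tune_ngrams, all_tune_ngram_counts.map (·.items))

-- ===== PRECONDITION & SPEC =====
def Spec_index_ngrams (tunes : List (List Int)) (ngram_size : Int) (out : (List (List Int × Int)) × (List (List Int × List (List (String × Int)))) × List (List (List Int)) × (List (List (List Int × Int)))) : Prop := out = index_ngrams_alt tunes ngram_size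
instance (tunes : List (List Int)) (ngram_size : Int) (out : (List (List Int × Int)) × (List (List Int × List (List (String × Int)))) × List (List (List Int)) × (List (List (List Int × Int)))) : Decidable (Spec_index_ngrams tunes ngram_size out) := by
  unfold Spec_index_ngrams
  exact @instDecidableEqProd _ _ _ (@instDecidableEqProd _ _ _ instDecidableEqProd) _ _

-- ===== CLAIM (what is proved, stated in full; the proofs are below) =====
def Claim_equal_index_ngrams : Prop := ∀ (tunes : List (List Int)) (ngram_size : Int), Dom_index_ngrams tunes ngram_size → Spec_index_ngrams tunes ngram_size (index_ngrams tunes ngram_size)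

-- ===== LEMMAS AND PROOFS =====

-- the per-tune (pos, ngram) pair list; pvTriples is its tagged flattening
def pvPairs (tune : List Int) (n : Int) : List (Int × List Int) :=
  (PySem.List.pyRange 0 ((tune.length : Int) - n + 1)).map
    (fun pos => (pos, PySem.List.slice tune (some pos) (some (pos + n))))

theorem pv_update_ofList {α : Type} [BEq α] [LawfulBEq α] (s : List α) (l : List α) :
    PySem.Set.update s (PySem.Set.ofList l) = PySem.Set.update s l := by
  induction l using List.reverseRecOn with
  | nil => rfl
  | append_singleton l x ih =>
    rw [PySem.Set.ofList_append_singleton, PySem.Set.add_eq_ite]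
    by_cases hx : x ∈ PySem.Set.ofList l
    · rw [if_pos hx]
      rw [ih, PySem.Set.update_append, PySem.Set.update_cons, PySem.Set.update_nil,
        PySem.Set.add_of_mem]
      exact (PySem.Set.mem_update _ _ _).mpr (Or.inr ((PySem.Set.mem_ofList _ _).mp hx))
    · rw [if_neg hx, PySem.Set.update_append, PySem.Set.update_append,
        PySem.Set.update_cons, PySem.Set.update_cons, PySem.Set.update_nil, PySem.Set.update_nil, ih]

theorem pv_getD_addFold (l : List (List Int × Int)) (t : PySem.Dict (List Int) Int) (k : List Int) :
    (l.foldl (fun t kv => t.insert kv.1 (t.getD kv.1 0 + kv.2)) t).getD k 0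
      = t.getD k 0 + ((l.filter (fun kv => kv.1 == k)).map (·.2)).sum := by
  induction l generalizing t with
  | nil => simp
  | cons a l ih =>
    simp only [List.foldl_cons, ih, List.filter_cons]
    by_cases h : a.1 = k
    · subst h
      simp [PySem.Dict.getD_insert_self]
      ring
    · rw [PySem.Dict.getD_insert_of_ne (hne := fun hh => h hh.symm)]
      simp [beq_iff_eq, h]

theorem pv_getD_counterAdd (t : PySem.Dict (List Int) Int) (xs : List (List Int)) (k : List Int) :
    (pvCounterAdd t (PySem.Dict.counter xs)).getD k 0 = t.getD k 0 + xs.count k := by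
  rw [pvCounterAdd, pv_getD_addFold, PySem.Dict.items_counter]
  congr 1
  rw [List.filter_map]
  rw [show ((fun (kv : List ℤ × ℤ) => kv.1 == k) ∘ fun a => (a, (xs.count a : ℤ))) = fun a => a == k from rfl]
  rw [List.filter_beq, List.map_map, List.map_replicate]
  by_cases hk : k ∈ xs
  · rw [List.count_eq_one_of_mem (PySem.Set.nodup_ofList _) (((PySem.Set.mem_ofList _ _)).mpr hk)]
    simp
  · rw [List.count_eq_zero.mpr (fun hc => hk ((PySem.Set.mem_ofList _ _).mp hc))]
    rw [List.count_eq_zero.mpr hk]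
    simp

theorem pv_keys_counterAdd (t : PySem.Dict (List Int) Int) (xs : List (List Int)) :
    (pvCounterAdd t (PySem.Dict.counter xs)).keys = PySem.Set.update t.keys xs := by
  rw [pvCounterAdd, PySem.Dict.keys_foldl_insert_key]
  rw [show (PySem.Dict.counter xs).items.map (fun kv => kv.1) = (PySem.Dict.counter xs).keys from rfl]
  rw [PySem.Dict.keys_counter, pv_update_ofList]

-- Counter.__iadd__ of two Counters is the Counter of the concatenation
theorem pv_counterAdd_counter (ys xs : List (List Int)) :
    pvCounterAdd (PySem.Dict.counter ys) (PySem.Dict.counter xs)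
      = PySem.Dict.counter (ys ++ xs) := by
  have hkeys : (pvCounterAdd (PySem.Dict.counter ys) (PySem.Dict.counter xs)).keys
      = (PySem.Dict.counter (ys ++ xs)).keys := by
    rw [pv_keys_counterAdd, PySem.Dict.keys_counter, PySem.Dict.keys_counter,
      PySem.Set.ofList_eq_foldl, PySem.Set.ofList_eq_foldl, List.foldl_append]
    rfl
  have hnd : (pvCounterAdd (PySem.Dict.counter ys) (PySem.Dict.counter xs)).keys.Nodup := by
    rw [hkeys]; exact PySem.Dict.nodup_keys_counter _
  apply PySem.Dict.ext
  rw [PySem.Dict.items_eq_map_keys _ hnd 0,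
    PySem.Dict.items_eq_map_keys _ (PySem.Dict.nodup_keys_counter _) 0, hkeys]
  refine List.map_congr_left (fun k _ => ?_)
  refine congrArg (Prod.mk k) ?_
  rw [pv_getD_counterAdd, PySem.Dict.getD_counter, PySem.Dict.getD_counter,
    List.count_append]
  push_cast; ring

-- A's running total over a list of ngram lists is the Counter of their concatenation
theorem pv_total_eq_counter_flatten (xss : List (List (List Int))) : ∀ (ys : List (List Int)),
    xss.foldl (fun t xs => pvCounterAdd t (PySem.Dict.counter xs)) (PySem.Dict.counter ys)
      = PySem.Dict.counter (ys ++ xss.flatten) := by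
  induction xss with
  | nil => intro ys; simp
  | cons xs xss ih =>
    intro ys
    simp only [List.foldl_cons, pv_counterAdd_counter, ih, List.flatten_cons, List.append_assoc]

theorem pv_enumerate_map {α β : Type} (f : α → β) (l : List α) (s : Int) :
    PySem.List.enumerate (l.map f) s = (PySem.List.enumerate l s).map (fun p => (p.1, f p.2)) := by
  induction l generalizing s with
  | nil => simp [PySem.List.enumerate_nil]
  | cons a l ih => simp [PySem.List.enumerate_cons, ih]

-- enumerate of a map over range(k) pairs each index with its image
theorem pv_enumerate_map_pyRange {β : Type} (f : Int → β) : ∀ (k : Nat) (a : Int),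
    PySem.List.enumerate ((PySem.List.pyRange a (a + k)).map f) a
      = (PySem.List.pyRange a (a + k)).map (fun i => (i, f i)) := by
  intro k
  induction k with
  | zero =>
    intro a
    rw [PySem.List.pyRange_one_eq_nil (by omega)]
    simp [PySem.List.enumerate_nil]
  | succ k ih =>
    intro a
    rw [show a + ((k + 1 : Nat) : Int) = (a + 1) + (k : Int) by push_cast; ring]
    rw [PySem.List.pyRange_one_cons (by omega)]
    simp only [List.map_cons, PySem.List.enumerate_cons]
    rw [ih (a + 1)]

theorem pv_enumerate_pairs (tune : List Int) (n : Int) :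
    PySem.List.enumerate (get_ngrams tune n) 0 = pvPairs tune n := by
  rw [get_ngrams, pvPairs]
  by_cases h : (tune.length : Int) - n + 1 ≤ 0
  · rw [PySem.List.pyRange_one_eq_nil h]; simp [PySem.List.enumerate_nil]
  · rw [not_le] at h
    obtain ⟨k, hk⟩ : ∃ k : Nat, (tune.length : Int) - n + 1 = 0 + k :=
      ⟨((tune.length : Int) - n + 1).toNat, by omega⟩
    rw [hk, pv_enumerate_map_pyRange]

-- pvTriples is the tagged flattening of the per-tune pair lists
theorem pv_triples_eq (tunes : List (List Int)) (n : Int) :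
    pvTriples tunes n
      = (PySem.List.enumerate (tunes.map (fun t => pvPairs t n)) 0).flatMap
          (fun p => p.2.map (fun q => (p.1, q))) := by
  rw [pvTriples, pv_enumerate_map, List.flatMap_map]
  refine List.flatMap_congr (fun p _ => ?_)
  rw [pvPairs, List.map_map]
  rfl

-- generic: a fold over the tagged flattening that updates slot tune_id per triple
-- acts independently on each slot
theorem pv_modify_append {α : Type} (pre : List α) (a : α) (rest : List α) (f : α → α) :
    (pre ++ a :: rest).modify pre.length f = pre ++ f a :: rest := by
  rw [List.modify_eq_set_getElem?]
  simp

theorem pv_fold_modify_at {α β : Type} (upd : α → β → α) (i : Nat) :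
    ∀ (L : List β) (pre : List α) (a : α) (rest : List α), pre.length = i →
    L.foldl (fun ls x => ls.modify i (fun y => upd y x)) (pre ++ a :: rest)
      = pre ++ (L.foldl upd a) :: rest := by
  intro L
  induction L with
  | nil => intro pre a rest _; simp
  | cons x L ih =>
    intro pre a rest hpre
    subst hpre
    simp only [List.foldl_cons]
    rw [pv_modify_append]
    exact ih pre (upd a x) rest rfl

theorem pv_fold_idx {α β : Type} (upd : α → β → α) (e : α) :
    ∀ (groups : List (List β)) (pre : List α),
    (((PySem.List.enumerate groups (pre.length : Int)).flatMap
        (fun p => p.2.map (fun q => (p.1, q)))).foldl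
      (fun ls t => ls.modify t.1.toNat (fun a => upd a t.2))
      (pre ++ groups.map (fun _ => e)))
    = pre ++ groups.map (fun L => L.foldl upd e) := by
  intro groups
  induction groups with
  | nil => intro pre; simp [PySem.List.enumerate_nil]
  | cons L groups ih =>
    intro pre
    rw [PySem.List.enumerate_cons]
    simp only [List.flatMap_cons, List.foldl_append, List.map_cons]
    rw [List.foldl_map]
    have h1 : (L.foldl
        (fun ls (x : β) => ls.modify ((pre.length : Int)).toNat (fun a => upd a x))
        (pre ++ e :: groups.map (fun _ => e)))
        = pre ++ (L.foldl upd e) :: groups.map (fun _ => e) := by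
      rw [Int.toNat_natCast]
      exact pv_fold_modify_at upd pre.length L pre e _ rfl
    rw [h1]
    have h2 : pre ++ L.foldl upd e :: groups.map (fun _ => e)
        = (pre ++ [L.foldl upd e]) ++ groups.map (fun _ => e) := by simp
    have h3 : ((pre.length : Int)) + 1 = (((pre ++ [L.foldl upd e]).length : Nat) : Int) := by
      simp
    rw [h2, h3, ih (pre ++ [L.foldl upd e])]
    simp

theorem pv_fold_idx0 {α β : Type} (upd : α → β → α) (e : α) (groups : List (List β)) :
    (((PySem.List.enumerate groups 0).flatMap
        (fun p => p.2.map (fun q => (p.1, q)))).foldl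
      (fun ls t => ls.modify t.1.toNat (fun a => upd a t.2))
      (groups.map (fun _ => e)))
    = groups.map (fun L => L.foldl upd e) := by
  simpa using pv_fold_idx upd e groups []

-- B's occurrence fold over the flat triples is A's nested pvOccStep fold
theorem pv_occ_eq (tunes : List (List Int)) (n : Int)
    (d : PySem.Dict (List Int) (List (List (String × Int)))) :
    (pvTriples tunes n).foldl
        (fun d t => d.modify t.2.2 [] (fun v => v ++ [[("tune_id", t.1), ("pos", t.2.1)]])) d
      = (PySem.List.enumerate tunes 0).foldl
          (fun d p => pvOccStep p.1 (get_ngrams p.2 n) d) d := by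
  rw [pv_triples_eq, List.foldl_flatMap, pv_enumerate_map, List.foldl_map]
  refine PySem.List.foldl_congr_mem _ _ _ _ (fun d p _ => ?_)
  rw [List.foldl_map, pvOccStep, pv_enumerate_pairs]

-- A's main loop splits into its four independent accumulations
theorem pv_mainA (n : Int) (tunes : List (List Int)) : ∀ (tid : Int)
    (t0 : PySem.Dict (List Int) Int)
    (occ0 : PySem.Dict (List Int) (List (List (String × Int))))
    (aN : List (List (List Int))) (aC : List (PySem.Dict (List Int) Int)),
    (PySem.List.enumerate tunes tid).foldl (pvStepA n) (t0, occ0, aN, aC)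
      = (tunes.foldl (fun t tune => pvCounterAdd t (PySem.Dict.counter (get_ngrams tune n))) t0,
         (PySem.List.enumerate tunes tid).foldl
           (fun d p => pvOccStep p.1 (get_ngrams p.2 n) d) occ0,
         aN ++ tunes.map (fun t => get_ngrams t n),
         aC ++ tunes.map (fun t => PySem.Dict.counter (get_ngrams t n))) := by
  induction tunes with
  | nil => intro tid t0 occ0 aN aC; simp [PySem.List.enumerate_nil]
  | cons t rest ih =>
    intro tid t0 occ0 aN aC
    rw [PySem.List.enumerate_cons]
    simp only [List.foldl_cons]
    rw [show pvStepA n (t0, occ0, aN, aC) (tid, t)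
        = (pvCounterAdd t0 (PySem.Dict.counter (get_ngrams t n)),
           pvOccStep tid (get_ngrams t n) occ0,
           aN ++ [get_ngrams t n],
           aC ++ [PySem.Dict.counter (get_ngrams t n)]) from rfl]
    rw [ih]
    simp [List.append_assoc]

-- the ngram column of the triples is the concatenation of the per-tune ngram lists
theorem pv_triples_map_ngram (tunes : List (List Int)) (n : Int) :
    (pvTriples tunes n).map (fun t => t.2.2)
      = (tunes.map (fun t => get_ngrams t n)).flatten := by
  rw [pv_triples_eq, List.map_flatMap]
  rw [show (fun (p : Int × List (Int × List Int)) =>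
      List.map (fun t => t.2.2) (p.2.map (fun q => (p.1, q))))
    = fun p => p.2.map (fun q => q.2) from funext (fun p => by rw [List.map_map]; rfl)]
  rw [← List.flatMap_map (fun p : Int × List (Int × List Int) => p.2)
        (fun l : List (Int × List Int) => l.map (fun q => q.2)),
      PySem.List.map_snd_enumerate]
  rw [List.flatMap_map, ← List.flatMap_def]
  refine List.flatMap_congr (fun tune _ => ?_)
  rw [← pv_enumerate_pairs]
  exact PySem.List.map_snd_enumerate _ _

-- ===== VERDICT (by name: the statement is the Claim_ definition above) =====
theorem index_ngrams_spec : Claim_equal_index_ngrams := by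
  intro tunes n _
  show index_ngrams tunes n = index_ngrams_alt tunes n
  rw [index_ngrams, index_ngrams_alt, pv_mainA]
  refine congrArg₂ Prod.mk ?_ (congrArg₂ Prod.mk ?_ (congrArg₂ Prod.mk ?_ ?_))
  · -- total
    show (tunes.foldl
        (fun t tune => pvCounterAdd t (PySem.Dict.counter (get_ngrams tune n)))
        PySem.Dict.empty).items
      = (PySem.Dict.counter ((pvTriples tunes n).map (fun t => t.2.2))).items
    have hfm : tunes.foldl
        (fun t tune => pvCounterAdd t (PySem.Dict.counter (get_ngrams tune n)))
        (PySem.Dict.counter [])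
      = (tunes.map (fun tune => get_ngrams tune n)).foldl
          (fun t xs => pvCounterAdd t (PySem.Dict.counter xs)) (PySem.Dict.counter []) := by
      rw [List.foldl_map]
    rw [show (PySem.Dict.empty : PySem.Dict (List Int) Int) = PySem.Dict.counter [] from rfl,
      hfm, pv_total_eq_counter_flatten, List.nil_append, pv_triples_map_ngram]
  · -- ngram_occurrences
    show ((PySem.List.enumerate tunes 0).foldl
        (fun d p => pvOccStep p.1 (get_ngrams p.2 n) d) PySem.Dict.empty).items
      = ((pvTriples tunes n).foldl
          (fun d t => d.modify t.2.2 [] (fun v => v ++ [[("tune_id", t.1), ("pos", t.2.1)]]))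
          PySem.Dict.empty).items
    rw [pv_occ_eq]
  · -- all_tune_ngrams
    show tunes.map (fun t => get_ngrams t n)
      = (pvTriples tunes n).foldl
          (fun ls t => ls.modify t.1.toNat (fun xs => xs ++ [t.2.2]))
          (tunes.map (fun _ => ([] : List (List Int))))
    rw [pv_triples_eq,
      show tunes.map (fun _ => ([] : List (List Int)))
        = (tunes.map (fun t => pvPairs t n)).map (fun _ => ([] : List (List Int)))
        from by rw [List.map_map]; exact List.map_congr_left (fun _ _ => rfl),
      pv_fold_idx0 (fun a (q : Int × List Int) => a ++ [q.2]) ([] : List (List Int)),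
      List.map_map]
    refine List.map_congr_left (fun tune _ => ?_)
    rw [Function.comp, PySem.List.foldl_append_singleton_eq_map, List.nil_append,
      ← pv_enumerate_pairs, PySem.List.map_snd_enumerate]
  · -- all_tune_ngram_counts
    show (tunes.map (fun t => PySem.Dict.counter (get_ngrams t n))).map (·.items)
      = ((pvTriples tunes n).foldl
          (fun ls t => ls.modify t.1.toNat (fun d => d.modify t.2.2 0 (· + 1)))
          (tunes.map (fun _ => (PySem.Dict.empty : PySem.Dict (List Int) Int)))).map (·.items)
    rw [pv_triples_eq,
      show tunes.map (fun _ => (PySem.Dict.empty : PySem.Dict (List Int) Int))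
        = (tunes.map (fun t => pvPairs t n)).map
            (fun _ => (PySem.Dict.empty : PySem.Dict (List Int) Int))
        from by rw [List.map_map]; exact List.map_congr_left (fun _ _ => rfl),
      pv_fold_idx0 (fun (d : PySem.Dict (List Int) Int) (q : Int × List Int) =>
        d.modify q.2 0 (· + 1)) PySem.Dict.empty]
    simp only [List.map_map]
    refine List.map_congr_left (fun tune _ => ?_)
    show (PySem.Dict.counter (get_ngrams tune n)).items = _
    refine congrArg PySem.Dict.items ?_
    simp only [Function.comp_apply]
    rw [PySem.Dict.counter_eq_foldl, ← pv_enumerate_pairs,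
      ← List.foldl_map (f := fun q : Int × List Int => q.2)
        (g := fun (d : PySem.Dict (List Int) Int) x => d.modify x 0 (· + 1)),
      PySem.List.map_snd_enumerate]
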